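-- pv_equiv track=rewrite | github.com/Abhi-karthi/YoungWonks | abhikarthi-appikatla-competetive-coding-5-11-2024.py | find_key_with_longest_string_value
-- ===== SOURCE A (Python) =====
-- def find_key_with_longest_string_value(input_dict: dict):
--     mylist = []
--     value = ""
--     answer = ""
--     for i in input_dict:
--         mylist.append(input_dict[i])
--
--     for i in mylist:
--         if len(i) > len(value):
--             value = i
--
--     for i in input_dict:
--         if value == input_dict[i]:
--             answer = i
--     return answer
-- ===== SOURCE B (Python) =====
-- def find_key_with_longest_string_value(input_dict: dict):
--     best = ""
--     answer = ""
--     for k, v in input_dict.items():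
--         if len(v) > len(best):
--             best = v
--             answer = k
--         elif v == best:
--             answer = k
--     return answer
-- ===== Notes on version B (the rewrite author's own statement) =====
-- stated objective: simpler
-- what changed: Replaces A's three passes (collect values, find first longest value, rescan for the last key with that value) by one single pass over items() tracking the running best value and answer key.
import Mathlib
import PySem

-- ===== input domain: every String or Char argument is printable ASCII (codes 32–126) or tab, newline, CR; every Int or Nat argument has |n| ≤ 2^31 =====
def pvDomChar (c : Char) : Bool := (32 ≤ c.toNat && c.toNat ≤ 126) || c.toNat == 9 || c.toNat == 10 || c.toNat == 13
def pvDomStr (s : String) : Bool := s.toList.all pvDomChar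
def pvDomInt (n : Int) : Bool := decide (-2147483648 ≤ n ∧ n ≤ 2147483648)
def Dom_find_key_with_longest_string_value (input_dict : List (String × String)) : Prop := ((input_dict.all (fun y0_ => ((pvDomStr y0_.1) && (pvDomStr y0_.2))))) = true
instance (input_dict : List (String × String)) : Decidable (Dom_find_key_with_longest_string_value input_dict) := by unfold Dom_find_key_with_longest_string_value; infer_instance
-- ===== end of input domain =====

-- B replaces A's three passes by one single pass over items(); same return value, objective: simpler.

-- ===== PORT A =====
-- The Python argument is a dict, so the association list is first collapsed to dict
-- semantics (unique keys, first position, last value) with PySem.Dict.ofList.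
-- input_dict[i] with i drawn from the dict's own keys never raises; it is ported as
-- getD i "" (exact, since every iterated key is present).
def find_key_with_longest_string_value (input_dict : List (String × String)) : String :=
  let d := PySem.Dict.ofList input_dict
  let mylist := d.keys.foldl (fun mylist i => mylist ++ [d.getD i ""]) []
  let value := mylist.foldl (fun value i => if PySem.Str.len i > PySem.Str.len value then i else value) ""
  d.keys.foldl (fun answer i => if value = d.getD i "" then i else answer) ""

-- ===== PORT B =====
def find_key_with_longest_string_value_alt (input_dict : List (String × String)) : String :=
  let r := (PySem.Dict.ofList input_dict).items.foldl
    (fun (p : String × String) (kv : String × String) =>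
      if PySem.Str.len kv.2 > PySem.Str.len p.1 then (kv.2, kv.1)
      else if kv.2 = p.1 then (p.1, kv.1) else p)
    ("", "")
  r.2

-- ===== PRECONDITION & SPEC =====
def Spec_find_key_with_longest_string_value (input_dict : List (String × String)) (out : String) : Prop := out = find_key_with_longest_string_value_alt input_dict
instance (input_dict : List (String × String)) (out : String) : Decidable (Spec_find_key_with_longest_string_value input_dict out) := by unfold Spec_find_key_with_longest_string_value; infer_instance

-- ===== CLAIM (what is proved, stated in full; the proofs are below) =====
def Claim_equal_find_key_with_longest_string_value : Prop := ∀ (input_dict : List (String × String)), Dom_find_key_with_longest_string_value input_dict → Spec_find_key_with_longest_string_value input_dict (find_key_with_longest_string_value input_dict)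

-- ===== LEMMAS AND PROOFS =====

-- A's second pass, with the accumulator generalized.
def pvValf (v : String) (ss : List String) : String :=
  ss.foldl (fun value i => if PySem.Str.len i > PySem.Str.len value then i else value) v

-- A's third pass, with the target and accumulator generalized.
def pvAnsA (t : String) (a : String) (l : List (String × String)) : String :=
  l.foldl (fun answer kv => if t = kv.2 then kv.1 else answer) a

theorem pvValf_cons (v s : String) (ss : List String) :
    pvValf v (s :: ss) = pvValf (if PySem.Str.len s > PySem.Str.len v then s else v) ss := rfl

theorem pvValf_mem (ss : List String) : ∀ v, pvValf v ss = v ∨ pvValf v ss ∈ ss := by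
  induction ss with
  | nil => intro v; left; rfl
  | cons s ss ih =>
      intro v
      rw [pvValf_cons]
      by_cases h : PySem.Str.len s > PySem.Str.len v
      · simp only [if_pos h]
        rcases ih s with h' | h'
        · right; rw [h']; exact List.mem_cons_self
        · right; exact List.mem_cons_of_mem _ h'
      · simp only [if_neg h]
        rcases ih v with h' | h'
        · left; exact h'
        · right; exact List.mem_cons_of_mem _ h'

theorem pvAnsA_indep (l : List (String × String)) :
    ∀ t a a', t ∈ l.map (·.2) → pvAnsA t a l = pvAnsA t a' l := by
  induction l with
  | nil => intro t a a' h; simp at h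
  | cons kv l ih =>
      intro t a a' h
      show pvAnsA t (if t = kv.2 then kv.1 else a) l = pvAnsA t (if t = kv.2 then kv.1 else a') l
      by_cases ht : t = kv.2
      · simp [ht]
      · simp only [if_neg ht]
        have hm : t ∈ l.map (·.2) := by
          rw [List.map_cons] at h
          rcases List.mem_cons.mp h with h' | h'
          · exact absurd h' ht
          · exact h'
        exact ih t a a' hm

-- The single-pass fold computes (first longest value so far, A's answer for that value).
theorem pvMain (l : List (String × String)) : ∀ v a,
    l.foldl (fun (p : String × String) (kv : String × String) =>
      if PySem.Str.len kv.2 > PySem.Str.len p.1 then (kv.2, kv.1)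
      else if kv.2 = p.1 then (p.1, kv.1) else p) (v, a)
    = (pvValf v (l.map (·.2)), pvAnsA (pvValf v (l.map (·.2))) a l) := by
  induction l with
  | nil => intro v a; rfl
  | cons kv l ih =>
      intro v a
      rcases kv with ⟨k, s⟩
      simp only [List.foldl_cons, List.map_cons, pvValf_cons]
      by_cases h : PySem.Str.len s > PySem.Str.len v
      · simp only [if_pos h]
        rw [ih s k]
        set t := pvValf s (l.map (·.2)) with ht
        show _ = (t, pvAnsA t (if t = s then k else a) l)
        by_cases hts : t = s
        · simp [hts]
        · simp only [if_neg hts]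
          have hmem : t ∈ l.map (·.2) := by
            rcases pvValf_mem (l.map (·.2)) s with h' | h'
            · exact absurd h' hts
            · exact h'
          rw [pvAnsA_indep l t k a hmem]
      · simp only [if_neg h]
        by_cases hsv : s = v
        · simp only [if_pos hsv]
          rw [ih v k]
          set t := pvValf v (l.map (·.2)) with ht
          show _ = (t, pvAnsA t (if t = s then k else a) l)
          by_cases hts : t = s
          · simp [hts]
          · have htv : t ≠ v := fun hv => hts (hv.trans hsv.symm)
            simp only [if_neg hts]
            have hmem : t ∈ l.map (·.2) := by
              rcases pvValf_mem (l.map (·.2)) v with h' | h'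
              · exact absurd h' htv
              · exact h'
            rw [pvAnsA_indep l t k a hmem]
        · simp only [if_neg hsv]
          rw [ih v a]
          set t := pvValf v (l.map (·.2)) with ht
          show _ = (t, pvAnsA t (if t = s then k else a) l)
          by_cases hts : t = s
          · have htv : t ≠ v := fun hv => hsv (hts ▸ hv : s = v)
            simp only [if_pos hts]
            have hmem : t ∈ l.map (·.2) := by
              rcases pvValf_mem (l.map (·.2)) v with h' | h'
              · exact absurd h' htv
              · exact h'
            rw [pvAnsA_indep l t a k hmem]
          · simp [hts]

-- A's first pass over keys collects exactly the items' values.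
theorem pvCollect (d : PySem.Dict String String) (hnd : d.keys.Nodup)
    (l : List (String × String)) (hl : ∀ p ∈ l, p ∈ d.items) : ∀ acc,
    (l.map (·.1)).foldl (fun mylist i => mylist ++ [d.getD i ""]) acc = acc ++ l.map (·.2) := by
  induction l with
  | nil => intro acc; simp
  | cons p l ih =>
      intro acc
      have hp : d.getD p.1 "" = p.2 :=
        PySem.Dict.getD_of_mem_items d (by simpa using hl p (List.mem_cons_self)) hnd ""
      simp only [List.map_cons, List.foldl_cons, hp]
      rw [ih (fun q hq => hl q (List.mem_cons_of_mem _ hq))]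
      simp

-- A's third pass over keys equals the same pass over items.
theorem pvScan (d : PySem.Dict String String) (hnd : d.keys.Nodup)
    (l : List (String × String)) (hl : ∀ p ∈ l, p ∈ d.items) (t : String) : ∀ a,
    (l.map (·.1)).foldl (fun answer i => if t = d.getD i "" then i else answer) a = pvAnsA t a l := by
  induction l with
  | nil => intro a; rfl
  | cons p l ih =>
      intro a
      have hp : d.getD p.1 "" = p.2 :=
        PySem.Dict.getD_of_mem_items d (by simpa using hl p (List.mem_cons_self)) hnd ""
      simp only [List.map_cons, List.foldl_cons, hp]
      exact ih (fun q hq => hl q (List.mem_cons_of_mem _ hq)) _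

theorem pvKeys_eq (d : PySem.Dict String String) : d.keys = d.items.map (·.1) := rfl

-- ===== VERDICT (by name: the statement is the Claim_ definition above) =====
theorem find_key_with_longest_string_value_spec : Claim_equal_find_key_with_longest_string_value := by
  intro input_dict _
  unfold Spec_find_key_with_longest_string_value
  unfold find_key_with_longest_string_value find_key_with_longest_string_value_alt
  set d := PySem.Dict.ofList input_dict with hd
  have hnd : d.keys.Nodup := PySem.Dict.nodup_keys_ofList input_dict
  have h1 : d.keys.foldl (fun mylist i => mylist ++ [d.getD i ""]) [] = d.items.map (·.2) := by
    rw [pvKeys_eq]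
    simpa using pvCollect d hnd d.items (fun p hp => hp) []
  simp only [h1]
  rw [pvKeys_eq, pvScan d hnd d.items (fun p hp => hp), pvMain]
  rfl
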